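-- pv_equiv track=rewrite | github.com/LineageOS/android_system_sepolicy | tests/fc_sort.py | is_meta
-- ===== SOURCE A (Python) =====
-- META_CHARS = frozenset(['.', '^', '$', '?', '*', '+', '|', '[', '(', '{'])
--
-- ESCAPED_META_CHARS = frozenset([ '\\{}'.format(c) for c in META_CHARS ])
--
-- def is_meta(path):
--     """Indicates if a path contains any metacharacter."""
--     meta_char_count = 0
--     escaped_meta_char_count = 0
--     for c in META_CHARS:
--         if c in path:
--             meta_char_count += 1
--     for c in ESCAPED_META_CHARS:
--         if c in path:
--             escaped_meta_char_count += 1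
--     return meta_char_count > escaped_meta_char_count
-- ===== SOURCE B (Python) =====
-- META_CHARS = frozenset(['.', '^', '$', '?', '*', '+', '|', '[', '(', '{'])
--
-- ESCAPED_META_CHARS = frozenset([ '\\{}'.format(c) for c in META_CHARS ])
--
-- def is_meta(path):
--     """Indicates if a path contains any metacharacter."""
--     return any(c in path and ('\\' + c) not in path for c in META_CHARS)
-- ===== Notes on version B (the rewrite author's own statement) =====
-- stated objective: simpler
-- what changed: Replaces the two counting loops and the count comparison by a single short-circuiting any() over META_CHARS looking for a metachar that occurs but never in escaped form; equivalent because '\'+c in path implies c in path, so the counts differ exactly when such a char exists.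
import Mathlib
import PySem

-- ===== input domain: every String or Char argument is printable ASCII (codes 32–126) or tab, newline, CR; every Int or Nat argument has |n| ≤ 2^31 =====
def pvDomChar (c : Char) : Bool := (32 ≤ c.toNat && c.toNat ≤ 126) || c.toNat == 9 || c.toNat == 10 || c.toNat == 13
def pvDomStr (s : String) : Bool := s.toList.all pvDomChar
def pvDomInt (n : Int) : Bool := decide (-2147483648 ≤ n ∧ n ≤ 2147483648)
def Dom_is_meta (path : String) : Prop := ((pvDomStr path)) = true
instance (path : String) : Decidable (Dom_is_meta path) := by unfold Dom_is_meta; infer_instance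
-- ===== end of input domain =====

-- B replaces A's two counting passes and count comparison by one short-circuiting
-- search for a metachar present but never present escaped ("simpler" objective).

-- ===== PORT A =====
-- META_CHARS / ESCAPED_META_CHARS as lists (the counts are order-independent,
-- so the frozenset iteration order does not matter).
def metaChars : List String := [".", "^", "$", "?", "*", "+", "|", "[", "(", "{"]
def escapedMetaChars : List String := metaChars.map (fun c => "\\" ++ c)

def is_meta (path : String) : Bool :=
  let meta_char_count : Nat :=
    metaChars.foldl (fun n c => if PySem.Str.isIn c path then n + 1 else n) 0
  let escaped_meta_char_count : Nat :=
    escapedMetaChars.foldl (fun n c => if PySem.Str.isIn c path then n + 1 else n) 0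
  decide (meta_char_count > escaped_meta_char_count)

-- ===== PORT B =====
def is_meta_alt (path : String) : Bool :=
  metaChars.any (fun c => PySem.Str.isIn c path && !(PySem.Str.isIn ("\\" ++ c) path))

-- ===== PRECONDITION & SPEC =====
def Spec_is_meta (path : String) (out : Bool) : Prop := out = is_meta_alt path
instance (path : String) (out : Bool) : Decidable (Spec_is_meta path out) := by unfold Spec_is_meta; infer_instance

-- ===== CLAIM (what is proved, stated in full; the proofs are below) =====
def Claim_equal_is_meta : Prop := ∀ (path : String), Dom_is_meta path → Spec_is_meta path (is_meta path)

-- ===== LEMMAS AND PROOFS =====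

-- counting fold with an arbitrary accumulator
theorem cnt_foldl_acc (p : String → Bool) (L : List String) (a : Nat) :
    L.foldl (fun n c => if p c then n + 1 else n) a
      = a + L.foldl (fun n c => if p c then n + 1 else n) 0 := by
  induction L generalizing a with
  | nil => simp
  | cons c t ih =>
    simp only [List.foldl_cons]
    rw [ih (if p c then a + 1 else a), ih (if p c then 0 + 1 else 0)]
    split <;> omega

-- if q implies p on every element, q's count never exceeds p's
theorem cnt_mono (p q : String → Bool) (L : List String)
    (h : ∀ c ∈ L, q c = true → p c = true) :
    L.foldl (fun n c => if q c then n + 1 else n) 0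
      ≤ L.foldl (fun n c => if p c then n + 1 else n) 0 := by
  induction L with
  | nil => simp
  | cons c t ih =>
    have ht : ∀ x ∈ t, q x = true → p x = true := fun x hx => h x (List.mem_cons_of_mem c hx)
    have hih := ih ht
    simp only [List.foldl_cons]
    rw [cnt_foldl_acc p, cnt_foldl_acc q]
    by_cases hq : q c = true
    · have hp := h c (List.mem_cons_self ..) hq
      simp only [hq, hp, if_pos rfl]
      omega
    · rw [if_neg hq]
      split <;> omega

-- the core equivalence: strict count comparison ↔ existence of an unescaped hit
theorem cnt_gt_iff_any (p q : String → Bool) (L : List String)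
    (h : ∀ c ∈ L, q c = true → p c = true) :
    L.foldl (fun n c => if q c then n + 1 else n) 0
        < L.foldl (fun n c => if p c then n + 1 else n) 0
      ↔ L.any (fun c => p c && !q c) = true := by
  induction L with
  | nil => simp
  | cons c t ih =>
    have ht : ∀ x ∈ t, q x = true → p x = true := fun x hx => h x (List.mem_cons_of_mem c hx)
    have hih := ih ht
    have hmono := cnt_mono p q t ht
    simp only [List.foldl_cons, List.any_cons, Bool.or_eq_true]
    rw [cnt_foldl_acc p, cnt_foldl_acc q]
    rw [← hih]
    by_cases hq : q c = true
    · have hp := h c (List.mem_cons_self ..) hq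
      simp [hq, hp]
    · by_cases hp : p c = true
      · simp [hq, hp]
        omega
      · simp [hq, hp]

-- a substring of the form a ++ b occurring in s forces b to occur in s
theorem isIn_append_right (a b s : String)
    (h : PySem.Str.isIn (a ++ b) s = true) : PySem.Str.isIn b s = true := by
  rw [PySem.Str.isIn_iff_infix] at h ⊢
  have hsuf : b.toList <:+ (a ++ b).toList := by
    simp [String.toList_append]
  exact (hsuf.isInfix).trans h

theorem esc_implies (path : String) :
    ∀ c ∈ metaChars, PySem.Str.isIn ("\\" ++ c) path = true →
      PySem.Str.isIn c path = true :=
  fun c _ h => isIn_append_right "\\" c path h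

-- ===== VERDICT (by name: the statement is the Claim_ definition above) =====
theorem is_meta_spec : Claim_equal_is_meta := by
  intro path _
  show is_meta path = is_meta_alt path
  unfold is_meta is_meta_alt escapedMetaChars
  rw [List.foldl_map]
  have h := cnt_gt_iff_any (fun c => PySem.Str.isIn c path)
    (fun c => PySem.Str.isIn ("\\" ++ c) path) metaChars (esc_implies path)
  cases hb : metaChars.any (fun c => PySem.Str.isIn c path && !PySem.Str.isIn ("\\" ++ c) path) with
  | false => exact decide_eq_false (fun hx => by rw [h.mp hx] at hb; cases hb)
  | true => exact decide_eq_true (h.mpr hb)
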